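-- pv_equiv track=rewrite | github.com/minjunmy619-spec/ASS | tools/extract_chat_history.py | find_longest_prefix_overlap
-- ===== SOURCE A (Python) =====
-- MIN_FORK_OVERLAP_MESSAGES = 2
--
-- def find_longest_prefix_overlap(
--     session_sequence: list[tuple[str, str]],
--     accepted_sequences: list[list[tuple[str, str]]],
-- ) -> int:
--     best = 0
--     for previous in accepted_sequences:
--         max_overlap = min(len(session_sequence), len(previous))
--         overlap = 0
--         while overlap < max_overlap and session_sequence[overlap] == previous[overlap]:
--             overlap += 1
--         if overlap > best:
--             best = overlap
--
--     if best < MIN_FORK_OVERLAP_MESSAGES: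
--         return 0
--     return best
-- ===== SOURCE B (Python) =====
-- MIN_FORK_OVERLAP_MESSAGES = 2
--
-- def find_longest_prefix_overlap(
--     session_sequence: list[tuple[str, str]],
--     accepted_sequences: list[list[tuple[str, str]]],
-- ) -> int:
--     best = 0
--     candidates = accepted_sequences
--     for pos in range(len(session_sequence)):
--         next_candidates = [seq for seq in candidates
--                            if len(seq) > pos and seq[pos] == session_sequence[pos]]
--         if not next_candidates:
--             break
--         best = pos + 1
--         candidates = next_candidates
--     if best < MIN_FORK_OVERLAP_MESSAGES:
--         return 0
--     return best
-- ===== Notes on version B (the rewrite author's own statement) =====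
-- stated objective: alternative
-- what changed: Traverses column-by-column (position-first) maintaining a shrinking candidate set, instead of A's row-by-row per-sequence while loops computing each common-prefix length separately.
import Mathlib
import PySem

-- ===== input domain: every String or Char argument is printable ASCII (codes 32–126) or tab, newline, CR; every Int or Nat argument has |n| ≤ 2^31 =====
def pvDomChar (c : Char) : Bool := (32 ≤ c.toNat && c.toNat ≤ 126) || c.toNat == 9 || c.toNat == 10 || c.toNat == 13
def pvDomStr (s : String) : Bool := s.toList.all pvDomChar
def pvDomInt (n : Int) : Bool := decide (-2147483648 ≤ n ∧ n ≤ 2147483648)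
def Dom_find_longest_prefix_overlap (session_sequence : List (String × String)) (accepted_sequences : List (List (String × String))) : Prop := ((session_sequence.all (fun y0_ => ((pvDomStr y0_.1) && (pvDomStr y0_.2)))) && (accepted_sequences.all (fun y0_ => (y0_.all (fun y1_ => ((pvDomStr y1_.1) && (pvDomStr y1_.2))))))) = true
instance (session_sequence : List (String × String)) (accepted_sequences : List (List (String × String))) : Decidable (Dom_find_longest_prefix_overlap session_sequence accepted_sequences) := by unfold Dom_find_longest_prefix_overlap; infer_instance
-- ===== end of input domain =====

-- B traverses column-by-column (position-first) with a shrinking candidate set instead of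
-- A's row-by-row per-sequence while loops; alternative decomposition, same exact result.

-- ===== PORT A =====
-- the `while overlap < max_overlap and session_sequence[overlap] == previous[overlap]` loop;
-- indices are below both lengths when read, so `getElem?` equality is exact
def pvWhileA (s p : List (String × String)) (maxo i : Nat) : Nat :=
  if h : i < maxo ∧ s[i]? = p[i]? then pvWhileA s p maxo (i + 1) else i
termination_by maxo - i
decreasing_by omega

-- the `for previous in accepted_sequences` loop carrying `best`
def pvLoopA (s : List (String × String)) : List (List (String × String)) → Nat → Nat
  | [], best => best
  | previous :: rest, best =>
      let max_overlap := min s.length previous.length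
      let overlap := pvWhileA s previous max_overlap 0
      pvLoopA s rest (if overlap > best then overlap else best)

def find_longest_prefix_overlap (session_sequence : List (String × String)) (accepted_sequences : List (List (String × String))) : Int :=
  let best := pvLoopA session_sequence accepted_sequences 0
  if best < 2 then 0 else (best : Int)

-- ===== PORT B =====
-- the `for pos in range(len(session_sequence))` loop narrowing `candidates`, with break
def pvLoopB (s : List (String × String)) (pos : Nat) (cands : List (List (String × String))) (best : Nat) : Nat :=
  if h : pos < s.length then
    let next := cands.filter (fun seq => decide (pos < seq.length ∧ seq[pos]? = s[pos]?))
    if next.isEmpty then best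
    else pvLoopB s (pos + 1) next (pos + 1)
  else best
termination_by s.length - pos

def find_longest_prefix_overlap_alt (session_sequence : List (String × String)) (accepted_sequences : List (List (String × String))) : Int :=
  let best := pvLoopB session_sequence 0 accepted_sequences 0
  if best < 2 then 0 else (best : Int)

-- ===== PRECONDITION & SPEC =====
def Spec_find_longest_prefix_overlap (session_sequence : List (String × String)) (accepted_sequences : List (List (String × String))) (out : Int) : Prop := out = find_longest_prefix_overlap_alt session_sequence accepted_sequences
instance (session_sequence : List (String × String)) (accepted_sequences : List (List (String × String))) (out : Int) : Decidable (Spec_find_longest_prefix_overlap session_sequence accepted_sequences out) := by unfold Spec_find_longest_prefix_overlap; infer_instance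

-- ===== CLAIM (what is proved, stated in full; the proofs are below) =====
def Claim_equal_find_longest_prefix_overlap : Prop := ∀ (session_sequence : List (String × String)) (accepted_sequences : List (List (String × String))), Dom_find_longest_prefix_overlap session_sequence accepted_sequences → Spec_find_longest_prefix_overlap session_sequence accepted_sequences (find_longest_prefix_overlap session_sequence accepted_sequences)

-- ===== LEMMAS AND PROOFS =====

-- common prefix length (proof-only characterisation of both loops)
def pvCp : List (String × String) → List (String × String) → Nat
  | a :: xs, b :: ys => if a = b then pvCp xs ys + 1 else 0
  | _, _ => 0

theorem pvCp_nil_left (ys : List (String × String)) : pvCp [] ys = 0 := by cases ys <;> simp [pvCp]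

theorem pvCp_nil_right (xs : List (String × String)) : pvCp xs [] = 0 := by cases xs <;> simp [pvCp]

theorem pvCp_le_left : ∀ xs ys : List (String × String), pvCp xs ys ≤ xs.length := by
  intro xs
  induction xs with
  | nil => intro ys; simp [pvCp_nil_left]
  | cons a xs ih =>
    intro ys
    cases ys with
    | nil => simp [pvCp_nil_right]
    | cons b ys =>
      simp only [pvCp, List.length_cons]
      split_ifs with h
      · have := ih ys; omega
      · omega

-- A's while loop computes i + pvCp of the drops
theorem pvWhileA_eq_aux (s p : List (String × String)) :
    ∀ n i, min s.length p.length - i = n → i ≤ min s.length p.length →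
      pvWhileA s p (min s.length p.length) i = i + pvCp (s.drop i) (p.drop i) := by
  intro n
  induction n with
  | zero =>
    intro i hn hi
    have hi' : i = min s.length p.length := by omega
    rw [pvWhileA]
    rw [dif_neg (by omega)]
    have : s.length ≤ i ∨ p.length ≤ i := by omega
    rcases this with h | h
    · rw [List.drop_eq_nil_of_le h, pvCp_nil_left]; omega
    · rw [List.drop_eq_nil_of_le h, pvCp_nil_right]; omega
  | succ n ih =>
    intro i hn hi
    have hlt : i < min s.length p.length := by omega
    have hs : i < s.length := by omega
    have hp : i < p.length := by omega
    have hds : s.drop i = s[i] :: s.drop (i + 1) := List.drop_eq_getElem_cons hs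
    have hdp : p.drop i = p[i] :: p.drop (i + 1) := List.drop_eq_getElem_cons hp
    have hgs : s[i]? = some s[i] := List.getElem?_eq_getElem hs
    have hgp : p[i]? = some p[i] := List.getElem?_eq_getElem hp
    rw [pvWhileA]
    by_cases heq : s[i] = p[i]
    · rw [dif_pos ⟨hlt, by rw [hgs, hgp, heq]⟩]
      rw [ih (i + 1) (by omega) (by omega)]
      rw [hds, hdp]
      simp [pvCp, heq]
      omega
    · rw [dif_neg (by
        intro hc
        apply heq
        have := hc.2
        rw [hgs, hgp] at this
        exact Option.some.inj this)]
      rw [hds, hdp]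
      simp [pvCp, heq]

theorem pvWhileA_eq (s p : List (String × String)) :
    pvWhileA s p (min s.length p.length) 0 = pvCp s p := by
  have := pvWhileA_eq_aux s p (min s.length p.length) 0 (by omega) (by omega)
  simpa using this

-- the max-fold both loops reduce to
def pvF (s : List (String × String)) (b : Nat) (l : List (List (String × String))) : Nat :=
  l.foldl (fun b q => max b (pvCp s q)) b

theorem pvLoopA_eq (s : List (String × String)) :
    ∀ (accs : List (List (String × String))) (best : Nat),
      pvLoopA s accs best = pvF s best accs := by
  intro accs
  induction accs with
  | nil => intro best; simp [pvLoopA, pvF]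
  | cons q rest ih =>
    intro best
    simp only [pvLoopA, pvF, List.foldl_cons, pvWhileA_eq]
    rw [ih]
    congr 1
    split_ifs with h <;> omega

-- step characterisation of pvCp at position pos (given pos < |xs| and pos ≤ pvCp xs ys)
theorem pvCp_succ_iff :
    ∀ (pos : Nat) (xs ys : List (String × String)), pos < xs.length → pos ≤ pvCp xs ys →
      (pos + 1 ≤ pvCp xs ys ↔ (pos < ys.length ∧ ys[pos]? = xs[pos]?)) := by
  intro pos
  induction pos with
  | zero =>
    intro xs ys hx _
    cases xs with
    | nil => simp at hx
    | cons a xs =>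
      cases ys with
      | nil => simp [pvCp_nil_right]
      | cons b ys =>
        simp only [pvCp, List.length_cons, List.getElem?_cons_zero]
        split_ifs with h
        · simp [h]
        · simp [Ne.symm h]
  | succ k ih =>
    intro xs ys hx hc
    cases xs with
    | nil => simp at hx
    | cons a xs =>
      cases ys with
      | nil => rw [pvCp_nil_right] at hc; omega
      | cons b ys =>
        simp only [pvCp] at hc ⊢
        split_ifs at hc ⊢ with h
        · simp only [List.length_cons, List.getElem?_cons_succ]
          have := ih xs ys (by simpa using Nat.lt_of_succ_lt_succ (by simpa using hx)) (by omega)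
          constructor
          · intro hk
            have := this.mp (by omega)
            exact ⟨by omega, this.2⟩
          · intro ⟨h1, h2⟩
            have := this.mpr ⟨by omega, h2⟩
            omega
        · omega

theorem pvF_const (s : List (String × String)) :
    ∀ (l : List (List (String × String))) (b : Nat), (∀ q ∈ l, pvCp s q ≤ b) → pvF s b l = b := by
  intro l
  induction l with
  | nil => intro b _; simp [pvF]
  | cons q rest ih =>
    intro b hb
    simp only [pvF, List.foldl_cons]
    have h1 : max b (pvCp s q) = b := by have := hb q (by simp); omega
    rw [h1]
    exact ih b (fun q hq => hb q (by simp [hq]))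

-- dropping candidates whose pvCp equals pos does not change the fold once the accumulator exceeds pos
theorem pvF_filter (s : List (String × String)) (pos : Nat) :
    ∀ (l : List (List (String × String))) (b : Nat), pos + 1 ≤ b → (∀ q ∈ l, pos ≤ pvCp s q) →
      pvF s b (l.filter (fun q => decide (pos + 1 ≤ pvCp s q))) = pvF s b l := by
  intro l
  induction l with
  | nil => intro b _ _; simp
  | cons q rest ih =>
    intro b hb hl
    by_cases h : pos + 1 ≤ pvCp s q
    · rw [List.filter_cons_of_pos (by simpa using h)]
      simp only [pvF, List.foldl_cons]
      exact ih (max b (pvCp s q)) (by omega) (fun q hq => hl q (by simp [hq]))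
    · rw [List.filter_cons_of_neg (by simpa using h)]
      have hq : pvCp s q = pos := by have := hl q (by simp); omega
      simp only [pvF, List.foldl_cons]
      have : max b (pvCp s q) = b := by omega
      rw [this]
      exact ih b hb (fun q hq => hl q (by simp [hq]))

-- one column step of the fold
theorem pvF_step (s : List (String × String)) (pos : Nat) :
    ∀ (l : List (List (String × String))), (∀ q ∈ l, pos ≤ pvCp s q) →
      pvF s pos l =
        if (l.filter (fun q => decide (pos + 1 ≤ pvCp s q))).isEmpty then pos
        else pvF s (pos + 1) (l.filter (fun q => decide (pos + 1 ≤ pvCp s q))) := by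
  intro l
  induction l with
  | nil => intro _; simp [pvF]
  | cons q rest ih =>
    intro hl
    by_cases h : pos + 1 ≤ pvCp s q
    · rw [List.filter_cons_of_pos (by simpa using h)]
      rw [if_neg (by simp)]
      simp only [pvF, List.foldl_cons]
      have h1 : max pos (pvCp s q) = pvCp s q := by omega
      have h2 : max (pos + 1) (pvCp s q) = pvCp s q := by omega
      rw [h1, h2]
      rw [show (List.foldl (fun b q => max b (pvCp s q)) (pvCp s q) (rest.filter (fun q => decide (pos + 1 ≤ pvCp s q)))) = pvF s (pvCp s q) (rest.filter (fun q => decide (pos + 1 ≤ pvCp s q))) from rfl]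
      rw [pvF_filter s pos rest (pvCp s q) h (fun q hq => hl q (by simp [hq]))]
      rfl
    · rw [List.filter_cons_of_neg (by simpa using h)]
      have hq : pvCp s q = pos := by have := hl q (by simp); omega
      simp only [pvF, List.foldl_cons]
      have : max pos (pvCp s q) = pos := by omega
      rw [this]
      exact ih (fun q hq => hl q (by simp [hq]))

-- B's loop, started with best = pos, computes the same max-fold
theorem pvLoopB_eq (s : List (String × String)) :
    ∀ n pos (cands : List (List (String × String))), s.length - pos = n → pos ≤ s.length →
      (∀ q ∈ cands, pos ≤ pvCp s q) →
      pvLoopB s pos cands pos = pvF s pos cands := by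
  intro n
  induction n with
  | zero =>
    intro pos cands hn hpos hc
    rw [pvLoopB, dif_neg (by omega)]
    exact (pvF_const s cands pos (fun q hq => by
      have h1 := pvCp_le_left s q
      omega)).symm
  | succ n ih =>
    intro pos cands hn hpos hc
    have hlt : pos < s.length := by omega
    rw [pvLoopB, dif_pos hlt]
    have hfe : cands.filter (fun seq => decide (pos < seq.length ∧ seq[pos]? = s[pos]?)) =
        cands.filter (fun q => decide (pos + 1 ≤ pvCp s q)) := by
      apply List.filter_congr
      intro q hq
      have := pvCp_succ_iff pos s q hlt (hc q hq)
      simp only [decide_eq_decide]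
      exact this.symm
    rw [hfe]
    by_cases he : (cands.filter (fun q => decide (pos + 1 ≤ pvCp s q))).isEmpty
    · rw [if_pos he, pvF_step s pos cands hc, if_pos he]
    · rw [if_neg he]
      rw [ih (pos + 1) _ (by omega) (by omega) (fun q hq => by
        have := List.of_mem_filter hq
        simpa using this)]
      rw [pvF_step s pos cands hc, if_neg he]

-- ===== VERDICT (by name: the statement is the Claim_ definition above) =====
theorem find_longest_prefix_overlap_spec : Claim_equal_find_longest_prefix_overlap := by
  intro s accs _
  unfold Spec_find_longest_prefix_overlap find_longest_prefix_overlap find_longest_prefix_overlap_alt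
  rw [pvLoopA_eq, pvLoopB_eq s s.length 0 accs (by omega) (by omega) (fun q _ => Nat.zero_le _)]
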